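-- pv_equiv track=rewrite | github.com/Emi-Chan394/Teast1 | PZ_6/PZ_6_2.py | find_max_local_minimum
-- ===== SOURCE A (Python) =====
-- def find_max_local_minimum(arr):
--     if len(arr) < 3:
--         raise ValueError("Список должен содержать как минимум 3 элемента для поиска локальных минимумов.")
--
--     local_minima = []
--
--     # Проходим по списку, начиная со второго элемента и заканчивая предпоследним
--     for i in range(1, len(arr) - 1):
--         if arr[i] < arr[i - 1] and arr[i] < arr[i + 1]:
--             local_minima.append(arr[i])
--
--     # Если локальные минимумы найдены, возвращаем максимальный из них
--     if local_minima:
--         return max(local_minima)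
--     else:
--         return None  # Если локальных минимумов нет
-- ===== SOURCE B (Python) =====
-- def find_max_local_minimum(arr):
--     if len(arr) < 3:
--         raise ValueError("Список должен содержать как минимум 3 элемента для поиска локальных минимумов.")
--
--     # Stage 1: reduce the data to the sign of each adjacent step
--     # (+1 = step goes down, -1 = step goes up, 0 = flat).
--     sgn = [(x > y) - (x < y) for x, y in zip(arr, arr[1:])]
--     # Stage 2: an element is a local minimum iff the step into it goes down
--     # and the step out of it goes up.
--     mins = [v for v, d, u in zip(arr[1:], sgn, sgn[1:]) if d == 1 and u == -1]
--     return max(mins) if mins else None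
-- ===== Notes on version B (the rewrite author's own statement) =====
-- stated objective: alternative
-- what changed: B works in two staged passes over a derived representation: it first maps the list to the sign sequence of its adjacent steps (+1 down / -1 up / 0 flat), then selects the elements sitting between a down-step and an up-step and takes their max, instead of A's index loop that tests arr[i] against its neighbours while collecting a local_minima list.
import Mathlib
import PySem

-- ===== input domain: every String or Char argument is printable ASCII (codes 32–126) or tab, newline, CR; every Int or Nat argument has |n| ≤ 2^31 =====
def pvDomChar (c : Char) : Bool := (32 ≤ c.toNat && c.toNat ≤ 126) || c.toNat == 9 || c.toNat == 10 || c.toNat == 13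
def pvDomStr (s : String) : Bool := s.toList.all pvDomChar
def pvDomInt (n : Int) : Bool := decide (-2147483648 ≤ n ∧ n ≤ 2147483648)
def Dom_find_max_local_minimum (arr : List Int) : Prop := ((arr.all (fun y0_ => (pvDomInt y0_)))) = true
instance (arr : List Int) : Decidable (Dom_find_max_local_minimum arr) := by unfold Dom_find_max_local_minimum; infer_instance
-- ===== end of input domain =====

-- B replaces A's neighbour-testing index loop by two staged passes: map the list to the
-- sign sequence of its adjacent steps, then pick the elements between a down- and an
-- up-step and take their max; objective: alternative.

-- ===== PORT A =====
-- len(arr) < 3 raises ValueError: excluded by Pre_; the port returns none there.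
-- arr[i], arr[i-1], arr[i+1] use pyGetD with default 0: every index the loop visits is in range, so this is exact.
def find_max_local_minimum (arr : List Int) : Option Int :=
  if (arr.length : Int) < 3 then none
  else
    let local_minima := (PySem.List.pyRange 1 ((arr.length : Int) - 1)).foldl
      (fun acc i =>
        if PySem.List.pyGetD arr i 0 < PySem.List.pyGetD arr (i - 1) 0 ∧
           PySem.List.pyGetD arr i 0 < PySem.List.pyGetD arr (i + 1) 0
        then acc ++ [PySem.List.pyGetD arr i 0] else acc) []
    if local_minima.isEmpty then none else PySem.List.max? local_minima id

-- ===== PORT B =====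
-- (x > y) - (x < y): the sign of a step, as Source B computes it
def pvStepSgn (x y : Int) : Int :=
  (if x > y then 1 else 0) - (if x < y then 1 else 0)

-- staged passes: sign list of adjacent steps, then a comprehension over zip(arr[1:], sgn, sgn[1:]);
-- len(arr) < 3 raises (excluded by Pre_), port returns none there.
def find_max_local_minimum_alt (arr : List Int) : Option Int :=
  if (arr.length : Int) < 3 then none
  else
    let sgn := (arr.zip (PySem.List.slice arr (some 1) none)).map (fun p => pvStepSgn p.1 p.2)
    let mins := ((PySem.List.slice arr (some 1) none).zip (sgn.zip (PySem.List.slice sgn (some 1) none))).filterMap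
      (fun t => if t.2.1 = 1 ∧ t.2.2 = -1 then some t.1 else none)
    if mins.isEmpty then none else PySem.List.max? mins id

-- ===== PRECONDITION & SPEC =====
-- Pre_ excludes exactly the inputs (fewer than 3 elements) on which the Python A raises ValueError.
def Pre_find_max_local_minimum (arr : List Int) : Prop := 3 ≤ arr.length
instance (arr : List Int) : Decidable (Pre_find_max_local_minimum arr) := by
  unfold Pre_find_max_local_minimum; infer_instance
def pvWitness_find_max_local_minimum : List Int := [3, 1, 3]

def Spec_find_max_local_minimum (arr : List Int) (out : Option Int) : Prop := out = find_max_local_minimum_alt arr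
instance (arr : List Int) (out : Option Int) : Decidable (Spec_find_max_local_minimum arr out) := by unfold Spec_find_max_local_minimum; infer_instance

-- ===== CLAIM (what is proved, stated in full; the proofs are below) =====
def Claim_equal_find_max_local_minimum : Prop := ∀ (arr : List Int), Dom_find_max_local_minimum arr → Pre_find_max_local_minimum arr → Spec_find_max_local_minimum arr (find_max_local_minimum arr)

-- ===== LEMMAS AND PROOFS =====

-- the list of local minima, structurally over sliding windows (proof-side only)
def pvMins : List Int → List Int
  | a :: b :: c :: rs => (if b < a ∧ b < c then [b] else []) ++ pvMins (b :: c :: rs)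
  | _ => []

lemma pvGetApp (pre ys : List Int) (k : Nat) (d : Int) :
    PySem.List.pyGetD (pre ++ ys) ((pre.length : Int) + k) d = ys.getD k d := by
  have h : ((pre.length : Int) + k) = ((pre.length + k : Nat) : Int) := by push_cast; ring
  rw [h, PySem.List.pyGetD_natCast]
  simp [List.getD_eq_getElem?_getD, List.getElem?_append_right (by omega : pre.length ≤ pre.length + k)]

lemma pvFoldA (rest : List Int) :
    ∀ (pre acc : List Int) (a b : Int),
    (PySem.List.pyRange ((pre.length : Int) + 1) ((pre.length : Int) + 1 + rest.length)).foldl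
      (fun acc i =>
        if PySem.List.pyGetD (pre ++ a :: b :: rest) i 0 < PySem.List.pyGetD (pre ++ a :: b :: rest) (i - 1) 0 ∧
           PySem.List.pyGetD (pre ++ a :: b :: rest) i 0 < PySem.List.pyGetD (pre ++ a :: b :: rest) (i + 1) 0
        then acc ++ [PySem.List.pyGetD (pre ++ a :: b :: rest) i 0] else acc) acc
      = acc ++ pvMins (a :: b :: rest) := by
  induction rest with
  | nil =>
      intro pre acc a b
      rw [PySem.List.pyRange_one_eq_nil (by simp)]
      simp [pvMins]
  | cons c rs ih =>
      intro pre acc a b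
      rw [PySem.List.pyRange_one_cons (by push_cast [List.length_cons]; omega)]
      rw [List.foldl_cons]
      have h0 : PySem.List.pyGetD (pre ++ a :: b :: c :: rs) (((pre.length : Int) + 1) - 1) 0 = a := by
        have : ((pre.length : Int) + 1) - 1 = (pre.length : Int) + (0 : Nat) := by push_cast; ring
        rw [this, pvGetApp]; simp
      have h1 : PySem.List.pyGetD (pre ++ a :: b :: c :: rs) ((pre.length : Int) + 1) 0 = b := by
        have : ((pre.length : Int) + 1) = (pre.length : Int) + (1 : Nat) := by push_cast; ring
        rw [this, pvGetApp]; simp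
      have h2 : PySem.List.pyGetD (pre ++ a :: b :: c :: rs) (((pre.length : Int) + 1) + 1) 0 = c := by
        have : ((pre.length : Int) + 1) + 1 = (pre.length : Int) + (2 : Nat) := by push_cast; ring
        rw [this, pvGetApp]; simp
      rw [h0, h1, h2]
      have harr : pre ++ a :: b :: c :: rs = (pre ++ [a]) ++ b :: c :: rs := by simp
      have hlen : ((pre ++ [a]).length : Int) = (pre.length : Int) + 1 := by simp
      have hrange : (PySem.List.pyRange ((pre.length : Int) + 1 + 1) ((pre.length : Int) + 1 + ((c :: rs).length : Int)))
            = (PySem.List.pyRange (((pre ++ [a]).length : Int) + 1) (((pre ++ [a]).length : Int) + 1 + (rs.length : Int))) := by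
        rw [hlen]; congr 1; simp; ring
      by_cases hcond : b < a ∧ b < c
      · rw [if_pos hcond]
        rw [harr, hrange, ih (pre ++ [a]) (acc ++ [b]) b c]
        simp [pvMins, hcond]
      · rw [if_neg hcond]
        rw [harr, hrange, ih (pre ++ [a]) acc b c]
        simp [pvMins, hcond]

-- the sign list, structurally (proof-side name for B's first pass)
def pvSgnList : List Int → List Int
  | x :: y :: rs => pvStepSgn x y :: pvSgnList (y :: rs)
  | _ => []

lemma pvSgnList_eq (xs : List Int) :
    (xs.zip (xs.drop 1)).map (fun p => pvStepSgn p.1 p.2) = pvSgnList xs := by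
  induction xs with
  | nil => rfl
  | cons x ys ih =>
      cases ys with
      | nil => rfl
      | cons y rs => simp [pvSgnList, ← ih]

lemma pvFoldB : ∀ (xs : List Int),
    ((xs.drop 1).zip ((pvSgnList xs).zip ((pvSgnList xs).drop 1))).filterMap
      (fun t => if t.2.1 = 1 ∧ t.2.2 = -1 then some t.1 else none)
    = pvMins xs := by
  intro xs
  induction xs using pvMins.induct with
  | case1 a b c rs ih =>
      have hequiv : (pvStepSgn a b = 1 ∧ pvStepSgn b c = -1) ↔ (b < a ∧ b < c) := by
        unfold pvStepSgn
        constructor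
        · rintro ⟨h1, h2⟩
          refine ⟨?_, ?_⟩ <;> [skip; skip] <;>
          · by_contra h
            simp only [not_lt] at h
            split_ifs at h1 h2 <;> omega
        · rintro ⟨h1, h2⟩
          rw [if_pos h1, if_neg (by omega), if_pos h2, if_neg (by omega)]
          omega
      have e : (((a :: b :: c :: rs).drop 1).zip
            ((pvSgnList (a :: b :: c :: rs)).zip ((pvSgnList (a :: b :: c :: rs)).drop 1)))
          = (b, (pvStepSgn a b, pvStepSgn b c)) ::
            (((b :: c :: rs).drop 1).zip
              ((pvSgnList (b :: c :: rs)).zip ((pvSgnList (b :: c :: rs)).drop 1))) := rfl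
      rw [e, List.filterMap_cons, ih,
          show pvMins (a :: b :: c :: rs)
            = (if b < a ∧ b < c then [b] else []) ++ pvMins (b :: c :: rs) from by simp [pvMins]]
      by_cases hcond : b < a ∧ b < c
      · rw [if_pos (hequiv.mpr hcond), if_pos hcond]; rfl
      · rw [if_neg (mt hequiv.mp hcond), if_neg hcond]; rfl
  | case2 xs hxs =>
      match xs, hxs with
      | [], _ => rfl
      | [a], _ => rfl
      | [a, b], _ => rfl
      | a :: b :: c :: rs, h => exact absurd rfl (h a b c rs)

-- ===== VERDICT (by name: the statement is the Claim_ definition above) =====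
theorem find_max_local_minimum_spec : Claim_equal_find_max_local_minimum := by
  intro arr _ hpre
  unfold Spec_find_max_local_minimum
  unfold Pre_find_max_local_minimum at hpre
  obtain ⟨a, b, rest, rfl⟩ : ∃ a b rest, arr = a :: b :: rest := by
    match arr, hpre with
    | a :: b :: c :: rs, _ => exact ⟨a, b, c :: rs, rfl⟩
  have hlen3 : ¬ (((a :: b :: rest).length : Int) < 3) := by
    simp only [List.length_cons] at hpre ⊢; push_cast; omega
  have hA := pvFoldA rest [] [] a b
  simp only [List.nil_append, List.length_nil, Int.natCast_zero, zero_add] at hA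
  have hends : (((a :: b :: rest).length : Int) - 1) = 1 + (rest.length : Int) := by
    simp; ring
  simp only [find_max_local_minimum, find_max_local_minimum_alt, hlen3, if_false,
    PySem.List.slice_from_one, ← List.drop_one]
  rw [hends, hA, pvSgnList_eq, pvFoldB]
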